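-- pv_equiv track=rewrite | github.com/SPOClab-ca/word-class-flexibility | src/semantic_embedding.py | _wordpiece_matches
-- ===== SOURCE A (Python) =====
-- def _wordpiece_matches(wordpiece_tokens, word, i):
--   if word == None:
--     return False
--
--   word = word.lower()
--   wordpiece_tokens = [wp.lower() for wp in wordpiece_tokens]
--
--   if not word.startswith(wordpiece_tokens[i]):
--     return False
--   if word == wordpiece_tokens[i]:
--     return True
--
--   # Get the whole word, then compare
--   whole_word = wordpiece_tokens[i]
--   for j in range(i+1, len(wordpiece_tokens)):
--     if wordpiece_tokens[j].startswith('##'):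
--       whole_word += wordpiece_tokens[j][2:]
--     else:
--       whole_word += wordpiece_tokens[j]
--
--     if len(whole_word) >= len(word):
--       break
--
--   return word == whole_word
-- ===== SOURCE B (Python) =====
-- def _wordpiece_matches(wordpiece_tokens, word, i):
--     if word is None:
--         return False
--     rem = word.lower()
--     tok = wordpiece_tokens[i].lower()
--     if not rem.startswith(tok):
--         return False
--     rem = rem[len(tok):]
--     if rem == '':
--         return True
--     for j in range(i + 1, len(wordpiece_tokens)):
--         piece = wordpiece_tokens[j].lower()
--         content = piece[2:] if piece.startswith('##') else piece
--         if not rem.startswith(content):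
--             return False
--         rem = rem[len(content):]
--         if rem == '':
--             return True
--     return False
-- ===== Notes on version B (the rewrite author's own statement) =====
-- stated objective: faster
-- what changed: B consumes the word as a remaining suffix (startswith check + slice per wordpiece with early exit on first mismatch) and lowercases only the tokens it actually visits, instead of A's lowercasing the whole token list up front, building the concatenated string and comparing once at the end.
import Mathlib
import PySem

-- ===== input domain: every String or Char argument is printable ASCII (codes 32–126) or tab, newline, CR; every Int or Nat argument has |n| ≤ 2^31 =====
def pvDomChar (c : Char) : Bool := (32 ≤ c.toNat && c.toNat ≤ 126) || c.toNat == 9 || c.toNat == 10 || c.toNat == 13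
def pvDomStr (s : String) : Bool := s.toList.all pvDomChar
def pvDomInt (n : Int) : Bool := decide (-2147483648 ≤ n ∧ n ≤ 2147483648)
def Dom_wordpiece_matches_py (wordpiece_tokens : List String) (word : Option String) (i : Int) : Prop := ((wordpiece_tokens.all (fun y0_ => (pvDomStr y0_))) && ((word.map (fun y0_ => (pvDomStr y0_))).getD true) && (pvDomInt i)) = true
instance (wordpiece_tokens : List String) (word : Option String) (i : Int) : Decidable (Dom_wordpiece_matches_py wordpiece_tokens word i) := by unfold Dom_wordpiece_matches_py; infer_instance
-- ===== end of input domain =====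

-- B re-implements the check by consuming the word's remaining suffix piece by piece (early exit on
-- first mismatch) instead of A's building the whole concatenated string and comparing once at the end.


-- ===== PORT A =====
-- A's 'for j in range(i+1, len)' accumulating whole_word, with the 'len(whole_word) >= len(word)' break
def pvALoop (toks : List (List Char)) (word : List Char) : List Int → List Char → List Char
  | [], whole => whole
  | j :: js, whole =>
    let tj := (PySem.List.pyGet? toks j).getD []
    let content := if PySem.Chars.startswith tj ['#', '#'] then PySem.List.slice tj (some 2) none else tj
    let whole' := whole ++ content
    if word.length ≤ whole'.length then whole' else pvALoop toks word js whole'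

def wordpiece_matches_py (wordpiece_tokens : List String) (word : Option String) (i : Int) : Bool :=
  match word with
  | none => false
  | some w =>
    let wordL := PySem.Chars.lower w.toList
    let toks := wordpiece_tokens.map (fun wp => PySem.Chars.lower wp.toList)
    let ti := (PySem.List.pyGet? toks i).getD []   -- Pre_ excludes the IndexError (pyGet? = none) case
    if ¬ PySem.Chars.startswith wordL ti then false
    else if wordL = ti then true
    else decide (wordL = pvALoop toks wordL (PySem.List.pyRange (i + 1) wordpiece_tokens.length 1) ti)

-- ===== PORT B =====
-- B's loop: keep the unconsumed suffix 'rem', return False on first mismatch, True when rem is emptied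
def pvBLoop (toks : List String) : List Int → List Char → Bool
  | [], _ => false
  | j :: js, rem =>
    let piece := PySem.Chars.lower (((PySem.List.pyGet? toks j).getD "").toList)
    let content := if PySem.Chars.startswith piece ['#', '#'] then PySem.List.slice piece (some 2) none else piece
    if ¬ PySem.Chars.startswith rem content then false
    else
      let rem' := PySem.List.slice rem (some (content.length : Int)) none
      if rem' = [] then true else pvBLoop toks js rem'

def wordpiece_matches_py_alt (wordpiece_tokens : List String) (word : Option String) (i : Int) : Bool :=
  match word with
  | none => false
  | some w =>
    let rem := PySem.Chars.lower w.toList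
    let tok := PySem.Chars.lower (((PySem.List.pyGet? wordpiece_tokens i).getD "").toList)  -- same IndexError point as A, excluded by Pre_
    if ¬ PySem.Chars.startswith rem tok then false
    else
      let rem' := PySem.List.slice rem (some (tok.length : Int)) none
      if rem' = [] then true
      else pvBLoop wordpiece_tokens (PySem.List.pyRange (i + 1) wordpiece_tokens.length 1) rem'

-- ===== PRECONDITION & SPEC =====
-- Pre_ excludes exactly the IndexError: word ≠ None together with an index i outside wordpiece_tokens (both A and B raise there).
def Pre_wordpiece_matches_py (wordpiece_tokens : List String) (word : Option String) (i : Int) : Prop :=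
  word = none ∨ PySem.Raise.InRange wordpiece_tokens.length i
instance (wordpiece_tokens : List String) (word : Option String) (i : Int) : Decidable (Pre_wordpiece_matches_py wordpiece_tokens word i) := by unfold Pre_wordpiece_matches_py; infer_instance
def pvWitness_wordpiece_matches_py : List String × Option String × Int := (["ab", "##c", "d"], some "Abcd", 0)

def Spec_wordpiece_matches_py (wordpiece_tokens : List String) (word : Option String) (i : Int) (out : Bool) : Prop := out = wordpiece_matches_py_alt wordpiece_tokens word i
instance (wordpiece_tokens : List String) (word : Option String) (i : Int) (out : Bool) : Decidable (Spec_wordpiece_matches_py wordpiece_tokens word i out) := by unfold Spec_wordpiece_matches_py; infer_instance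

-- ===== CLAIM (what is proved, stated in full; the proofs are below) =====
def Claim_equal_wordpiece_matches_py : Prop := ∀ (wordpiece_tokens : List String) (word : Option String) (i : Int), Dom_wordpiece_matches_py wordpiece_tokens word i → Pre_wordpiece_matches_py wordpiece_tokens word i → Spec_wordpiece_matches_py wordpiece_tokens word i (wordpiece_matches_py wordpiece_tokens word i)

-- ===== LEMMAS AND PROOFS =====

-- pyGet? commutes with map (aligns A's pre-lowered list with B's on-access lowering)
theorem pvPyGet?_map {α β : Type} (f : α → β) (l : List α) (i : Int) :
    PySem.List.pyGet? (l.map f) i = (PySem.List.pyGet? l i).map f := by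
  simp [PySem.List.pyGet?, PySem.List.pyIdx?]

-- A's accumulator only grows: whole is a prefix of whatever pvALoop returns
theorem pvALoop_prefix (toks : List (List Char)) (word : List Char) (js : List Int) (whole : List Char) :
    whole <+: pvALoop toks word js whole := by
  induction js generalizing whole with
  | nil => simp [pvALoop]
  | cons j js ih =>
    simp only [pvALoop]
    set c := (if PySem.Chars.startswith ((PySem.List.pyGet? toks j).getD []) ['#', '#'] then PySem.List.slice ((PySem.List.pyGet? toks j).getD []) (some 2) none else (PySem.List.pyGet? toks j).getD []) with hc
    split
    · exact List.prefix_append _ _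
    · exact (List.prefix_append _ _).trans (ih _)

theorem pvALoop_ne (toks : List (List Char)) (word : List Char) (js : List Int) (whole : List Char)
    (h : ¬ whole <+: word) : decide (word = pvALoop toks word js whole) = false := by
  simp only [decide_eq_false_iff_not]
  intro he
  exact h (he ▸ pvALoop_prefix toks word js whole)

-- main loop equivalence: with word = whole ++ rem and rem nonempty, A's final comparison equals B's early-exit loop
theorem pvLoop_equiv (toks : List String) (word : List Char) (js : List Int) (whole rem : List Char)
    (hw : word = whole ++ rem) (hrem : rem ≠ []) :
    decide (word = pvALoop (toks.map (fun wp => PySem.Chars.lower wp.toList)) word js whole)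
      = pvBLoop toks js rem := by
  induction js generalizing whole rem with
  | nil =>
    simp only [pvALoop, pvBLoop, decide_eq_false_iff_not]
    intro he
    rw [hw] at he
    exact hrem (by simpa using he.symm)
  | cons j js ih =>
    have hpiece0 : ((PySem.List.pyGet? (toks.map (fun wp => PySem.Chars.lower wp.toList)) j).getD [])
        = PySem.Chars.lower (((PySem.List.pyGet? toks j).getD "").toList) := by
      rw [pvPyGet?_map]
      cases PySem.List.pyGet? toks j <;> simp [PySem.Chars.lower]
    set piece := PySem.Chars.lower (((PySem.List.pyGet? toks j).getD "").toList) with hp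
    set content := (if PySem.Chars.startswith piece ['#', '#'] then PySem.List.slice piece (some 2) none else piece) with hc
    have hAstep : pvALoop (toks.map (fun wp => PySem.Chars.lower wp.toList)) word (j :: js) whole
        = if word.length ≤ (whole ++ content).length then whole ++ content
          else pvALoop (toks.map (fun wp => PySem.Chars.lower wp.toList)) word js (whole ++ content) := by
      simp only [pvALoop, hpiece0, ← hc]
    have hdrop : PySem.List.slice rem (some (content.length : Int)) none = rem.drop content.length := by
      rw [PySem.List.slice_from_natCast rem content.length]
    have hBstep : pvBLoop toks (j :: js) rem
        = if ¬ PySem.Chars.startswith rem content then false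
          else if rem.drop content.length = [] then true
          else pvBLoop toks js (rem.drop content.length) := by
      simp only [pvBLoop, ← hp, ← hc, hdrop]
    rw [hAstep, hBstep]
    by_cases hsw : PySem.Chars.startswith rem content
    · have hc1 : ¬ ¬ PySem.Chars.startswith rem content = true := not_not_intro hsw
      have hpre : content <+: rem := (PySem.Chars.startswith_iff rem content).mp hsw
      have hsplit : rem = content ++ rem.drop content.length := by
        obtain ⟨t, ht⟩ := hpre
        conv_lhs => rw [← ht]
        rw [← ht]; simp
      rw [if_neg hc1]
      by_cases hnil : rem.drop content.length = []
      · have hwe : word = whole ++ content := by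
          rw [hw, hsplit, hnil]; simp
        have hlen : word.length ≤ (whole ++ content).length := by rw [hwe]
        rw [if_pos hnil, if_pos hlen]
        simp [hwe]
      · have hlens : word.length = whole.length + (content.length + (rem.drop content.length).length) := by
          rw [hw, hsplit]; simp
        have hpos : 0 < (rem.drop content.length).length := List.length_pos_iff.mpr hnil
        have hlt : ¬ word.length ≤ (whole ++ content).length := by
          simp only [List.length_append, not_le]; omega
        rw [if_neg hnil, if_neg hlt]
        exact ih (whole ++ content) (rem.drop content.length) (by rw [hw, hsplit]; simp) hnil
    · have hnp : ¬ (whole ++ content) <+: word := by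
        intro hpre
        rw [hw] at hpre
        exact hsw ((PySem.Chars.startswith_iff rem content).mpr ((List.prefix_append_right_inj whole).mp hpre))
      rw [if_pos hsw]
      split
      · simp only [decide_eq_false_iff_not]
        intro he
        exact hnp (he ▸ List.prefix_refl _)
      · exact pvALoop_ne _ _ _ _ hnp

-- ===== VERDICT (by name: the statement is the Claim_ definition above) =====
theorem wordpiece_matches_py_spec : Claim_equal_wordpiece_matches_py := by
  intro toks word i _hdom hpre
  unfold Spec_wordpiece_matches_py wordpiece_matches_py wordpiece_matches_py_alt
  cases word with
  | none => rfl
  | some w =>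
    have hin : PySem.Raise.InRange toks.length i := by
      rcases hpre with h | h
      · exact absurd h (by simp)
      · exact h
    obtain ⟨t, ht⟩ : ∃ t, PySem.List.pyGet? toks i = some t := by
      rcases Option.eq_none_or_eq_some (PySem.List.pyGet? toks i) with h | h
      · exact absurd hin ((PySem.List.pyGet?_eq_none_iff toks i).mp h)
      · exact h
    simp only [pvPyGet?_map, ht, Option.map_some, Option.getD_some]
    set wordL := PySem.Chars.lower w.toList with hwl
    set tiL := PySem.Chars.lower t.toList with htl
    have hdrop : PySem.List.slice wordL (some (tiL.length : Int)) none = wordL.drop tiL.length := by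
      rw [PySem.List.slice_from_natCast wordL tiL.length]
    by_cases hsw : PySem.Chars.startswith wordL tiL
    · have hpre' : tiL <+: wordL := (PySem.Chars.startswith_iff wordL tiL).mp hsw
      have hsplit : wordL = tiL ++ wordL.drop tiL.length := by
        obtain ⟨u, hu⟩ := hpre'
        conv_lhs => rw [← hu]
        rw [← hu]; simp
      by_cases heq : wordL = tiL
      · have hnil : wordL.drop tiL.length = [] := by rw [heq]; simp
        simp [heq]
      · have hne : wordL.drop tiL.length ≠ [] := by
          intro h0
          exact heq (by rw [hsplit, h0]; simp)
        simp only [hsw, not_true_eq_false, if_false, heq, hdrop, hne]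
        simpa [hne] using pvLoop_equiv toks wordL (PySem.List.pyRange (i + 1) toks.length 1)
          tiL (wordL.drop tiL.length) hsplit hne
    · simp [hsw]
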